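-- pv_equiv track=rewrite | github.com/Eckersleyful/bigdataentityresolution | graph_building.py | calculate_common_blocks_scheme
-- ===== SOURCE A (Python) =====
-- def weigh_common_blocks(edge, blocks):
--     common_counter = 0
--     first_entity = list(edge)[0]
--     second_entity = list(edge)[1]
--     for block in blocks:
--         entities_in_block = blocks[block]
--         if first_entity in entities_in_block and second_entity in entities_in_block:
--             common_counter += 1
--     return common_counter
--
-- def calculate_common_blocks_scheme(edges, blocks):
--     common_weighted_edges = {}
--     current_edge_index = 0
--     for edge in edges:
--         common_counter = weigh_common_blocks(edge, blocks)
--         common_weighted_edges[current_edge_index] = common_counter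
--         current_edge_index += 1
--     return common_weighted_edges
-- ===== SOURCE B (Python) =====
-- def calculate_common_blocks_scheme(edges, blocks):
--     # Inverted index: entity -> set of block ids containing it; then each
--     # edge's weight is the size of the intersection of its endpoints' sets.
--     member = {}
--     for block, ents in blocks.items():
--         for e in set(ents):
--             member.setdefault(e, set()).add(block)
--     empty = set()
--     return {i: len(member.get(u, empty) & member.get(v, empty))
--             for i, (u, v) in enumerate(edges)}
-- ===== Notes on version B (the rewrite author's own statement) =====
-- stated objective: faster
-- what changed: Instead of scanning every block's full member list for every edge, B builds an entity-to-block-set inverted index in one pass over the blocks and computes each edge's weight as a set intersection size.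
import Mathlib
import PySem

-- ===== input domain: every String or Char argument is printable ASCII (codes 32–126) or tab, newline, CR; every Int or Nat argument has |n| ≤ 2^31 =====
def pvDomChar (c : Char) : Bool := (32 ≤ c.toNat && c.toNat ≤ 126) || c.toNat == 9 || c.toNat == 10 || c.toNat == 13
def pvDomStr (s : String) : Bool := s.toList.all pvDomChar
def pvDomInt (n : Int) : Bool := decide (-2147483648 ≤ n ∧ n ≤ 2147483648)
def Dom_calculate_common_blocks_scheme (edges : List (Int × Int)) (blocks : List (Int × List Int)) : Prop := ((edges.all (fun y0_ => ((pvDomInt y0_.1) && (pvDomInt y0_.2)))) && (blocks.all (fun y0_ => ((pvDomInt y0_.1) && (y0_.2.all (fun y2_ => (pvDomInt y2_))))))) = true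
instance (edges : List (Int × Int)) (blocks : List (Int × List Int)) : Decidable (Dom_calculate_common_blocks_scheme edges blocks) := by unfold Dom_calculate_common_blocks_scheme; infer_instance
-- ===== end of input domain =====

-- B replaces A's per-edge scan of every block's member list by an entity→block-set
-- inverted index built once, each edge's weight becoming a set-intersection size (faster).

-- ===== PORT A =====
-- weigh_common_blocks: 'blocks[block]' is looked up via getD; block always comes from
-- the dict's own keys, so the lookup never raises and getD returns that key's value.
def pv_weigh_common_blocks (edge : Int × Int) (blocks : PySem.Dict Int (List Int)) : Int :=
  let first_entity := edge.1
  let second_entity := edge.2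
  blocks.keys.foldl (fun common_counter block =>
    let entities_in_block := blocks.getD block []
    if first_entity ∈ entities_in_block ∧ second_entity ∈ entities_in_block then
      common_counter + 1
    else common_counter) 0

def calculate_common_blocks_scheme (edges : List (Int × Int)) (blocks : List (Int × List Int)) : List (Int × Int) :=
  let d := PySem.Dict.ofList blocks
  (edges.foldl (fun (acc : PySem.Dict Int Int × Int) edge =>
      (acc.1.insert acc.2 (pv_weigh_common_blocks edge d), acc.2 + 1))
    (PySem.Dict.empty, 0)).1.items

-- ===== PORT B =====
def calculate_common_blocks_scheme_alt (edges : List (Int × Int)) (blocks : List (Int × List Int)) : List (Int × Int) :=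
  let d := PySem.Dict.ofList blocks
  let member := d.items.foldl
    (fun (md : PySem.Dict Int (PySem.Set Int)) p =>
      (PySem.Set.ofList p.2).foldl (fun md' e => md'.modify e [] (fun s => PySem.Set.add s p.1)) md)
    PySem.Dict.empty
  (PySem.List.enumerate edges).map (fun p =>
    (p.1, ((PySem.Set.inter (member.getD p.2.1 []) (member.getD p.2.2 [])).length : Int)))

-- ===== PRECONDITION & SPEC =====
def Spec_calculate_common_blocks_scheme (edges : List (Int × Int)) (blocks : List (Int × List Int)) (out : List (Int × Int)) : Prop := out = calculate_common_blocks_scheme_alt edges blocks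
instance (edges : List (Int × Int)) (blocks : List (Int × List Int)) (out : List (Int × Int)) : Decidable (Spec_calculate_common_blocks_scheme edges blocks out) := by unfold Spec_calculate_common_blocks_scheme; infer_instance

-- ===== CLAIM (what is proved, stated in full; the proofs are below) =====
def Claim_equal_calculate_common_blocks_scheme : Prop := ∀ (edges : List (Int × Int)) (blocks : List (Int × List Int)), Dom_calculate_common_blocks_scheme edges blocks → Spec_calculate_common_blocks_scheme edges blocks (calculate_common_blocks_scheme edges blocks)

-- ===== LEMMAS AND PROOFS =====

-- the blocks (in dict order) whose member list contains e
def pvBlocksOf (d : PySem.Dict Int (List Int)) (e : Int) : List Int :=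
  (d.items.filter (fun p => decide (e ∈ p.2))).map (·.1)

-- inner loop of the index build: effect on one entity's entry
theorem pv_inner_getD (S : List Int) (hS : S.Nodup) (md : PySem.Dict Int (PySem.Set Int))
    (e k : Int) :
    (S.foldl (fun md' x => md'.modify x [] (fun s => PySem.Set.add s k)) md).getD e []
      = if e ∈ S then PySem.Set.add (md.getD e []) k else md.getD e [] := by
  induction S generalizing md with
  | nil => simp
  | cons x S ih =>
    simp only [List.foldl_cons]
    rw [ih (List.Nodup.of_cons hS)]
    rcases eq_or_ne e x with rfl | hne
    · have hnot : e ∉ S := (List.nodup_cons.mp hS).1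
      simp [hnot]
    · simp [PySem.Dict.getD_modify, hne, List.mem_cons]

-- whole index build: one entity's entry is the fold of add over its block list
theorem pv_member_getD (l : List (Int × List Int)) (md : PySem.Dict Int (PySem.Set Int)) (e : Int) :
    (l.foldl (fun md p =>
        (PySem.Set.ofList p.2).foldl (fun md' x => md'.modify x [] (fun s => PySem.Set.add s p.1)) md)
      md).getD e []
    = ((l.filter (fun p => decide (e ∈ p.2))).map (·.1)).foldl PySem.Set.add (md.getD e []) := by
  induction l generalizing md with
  | nil => simp
  | cons p l ih =>
    simp only [List.foldl_cons, List.filter_cons]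
    rw [ih]
    rw [pv_inner_getD _ (PySem.Set.nodup_ofList p.2)]
    by_cases he : e ∈ p.2
    · simp [he, PySem.Set.mem_ofList]
    · simp [he, PySem.Set.mem_ofList]

theorem pv_nodup_blocksOf (d : PySem.Dict Int (List Int)) (hk : d.keys.Nodup) (e : Int) :
    (pvBlocksOf d e).Nodup := by
  have hsub : (pvBlocksOf d e).Sublist (d.items.map (·.1)) :=
    List.Sublist.map _ List.filter_sublist
  exact hsub.nodup hk

theorem pv_member_eq_blocksOf (d : PySem.Dict Int (List Int)) (hk : d.keys.Nodup) (e : Int) :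
    ((d.items.foldl (fun md p =>
        (PySem.Set.ofList p.2).foldl (fun md' x => md'.modify x [] (fun s => PySem.Set.add s p.1)) md)
      PySem.Dict.empty).getD e []) = pvBlocksOf d e := by
  rw [pv_member_getD]
  have h1 : ((d.items.filter (fun p => decide (e ∈ p.2))).map (·.1)).foldl PySem.Set.add ([] : PySem.Set Int)
      = PySem.Set.update [] ((d.items.filter (fun p => decide (e ∈ p.2))).map (·.1)) := by
    have := PySem.Set.update_map_eq_foldl_add ((d.items.filter (fun p => decide (e ∈ p.2))).map (·.1)) id ([] : PySem.Set Int)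
    simpa using this.symm
  simp only [PySem.Dict.getD_empty, h1, PySem.Set.update_nil_left]
  exact PySem.Set.ofList_eq_self_of_nodup _ (pv_nodup_blocksOf d hk e)

theorem pv_mem_blocksOf (d : PySem.Dict Int (List Int)) (hk : d.keys.Nodup)
    {k : Int} {m : List Int} (hkm : (k, m) ∈ d.items) (v : Int) :
    (k ∈ pvBlocksOf d v) ↔ v ∈ m := by
  unfold pvBlocksOf
  simp only [List.mem_map, List.mem_filter, decide_eq_true_eq]
  constructor
  · rintro ⟨⟨k', m'⟩, ⟨hmem, hv⟩, rfl⟩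
    have h1 := PySem.Dict.get?_of_mem_items d hkm hk
    have h2 := PySem.Dict.get?_of_mem_items d hmem hk
    rw [h1] at h2
    cases h2; exact hv
  · intro hv; exact ⟨(k, m), ⟨hkm, hv⟩, rfl⟩

-- counting fold = filter length
theorem pv_foldl_count {α : Type} (l : List α) (P : α → Prop) [DecidablePred P] (c : Int) :
    (l.foldl (fun acc x => if P x then acc + 1 else acc) c) = c + (l.filter (fun x => decide (P x))).length := by
  induction l generalizing c with
  | nil => simp
  | cons x l ih =>
    simp only [List.foldl_cons, List.filter_cons]
    by_cases h : P x
    · simp [h, ih]; omega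
    · simp [h, ih]

-- A's weight = length of the filtered items list
theorem pv_weigh_eq (d : PySem.Dict Int (List Int)) (hk : d.keys.Nodup) (u v : Int) :
    pv_weigh_common_blocks (u, v) d
      = ((d.items.filter (fun p => decide (u ∈ p.2) && decide (v ∈ p.2))).length : Int) := by
  unfold pv_weigh_common_blocks
  have hkeys : d.keys = d.items.map (·.1) := rfl
  rw [hkeys, List.foldl_map]
  rw [PySem.List.foldl_congr_mem d.items _
      (fun c p => if u ∈ p.2 ∧ v ∈ p.2 then c + 1 else c) 0
      (by
        intro acc p hp
        have : d.getD p.1 [] = p.2 := by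
          rcases p with ⟨k, m⟩
          exact PySem.Dict.getD_of_mem_items d hp hk []
        simp only [this])]
  rw [pv_foldl_count d.items (fun p => u ∈ p.2 ∧ v ∈ p.2) 0]
  simp

-- B's intersection size is the same count
theorem pv_inter_eq (d : PySem.Dict Int (List Int)) (hk : d.keys.Nodup) (u v : Int) :
    ((PySem.Set.inter (pvBlocksOf d u) (pvBlocksOf d v)).length : Int)
      = pv_weigh_common_blocks (u, v) d := by
  rw [pv_weigh_eq d hk u v]
  congr 1
  unfold PySem.Set.inter
  unfold pvBlocksOf
  rw [List.filter_map, List.length_map, List.filter_filter]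
  congr 1
  apply List.filter_congr
  intro p hp
  rcases p with ⟨k, m⟩
  have hm : (k ∈ pvBlocksOf d v) ↔ v ∈ m := pv_mem_blocksOf d hk hp v
  by_cases hu : u ∈ m
  · have : PySem.Set.contains (pvBlocksOf d v) k = decide (v ∈ m) := by
      rw [PySem.Set.contains_eq_listContains]
      simp [hm]
    simp [Function.comp, hu, pvBlocksOf] at this ⊢
    rw [this]
  · simp [hu, Function.comp]

-- A's output-building loop appends enumerated fresh keys
theorem pv_outer (w : (Int × Int) → Int) (l : List (Int × Int)) (dct : PySem.Dict Int Int) (i : Int)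
    (h : ∀ j, dct.contains j = true → j < i) :
    ((l.foldl (fun (acc : PySem.Dict Int Int × Int) edge =>
        (acc.1.insert acc.2 (w edge), acc.2 + 1)) (dct, i)).1.items)
      = dct.items ++ (PySem.List.enumerate l i).map (fun p => (p.1, w p.2)) := by
  induction l generalizing dct i with
  | nil => simp
  | cons x l ih =>
    simp only [List.foldl_cons]
    have hni : dct.contains i = false := by
      by_contra hc
      have := h i (by simpa using hc)
      omega
    rw [ih (dct.insert i (w x)) (i + 1) ?_]
    · rw [PySem.Dict.items_insert_of_not_contains _ _ hni]
      rw [PySem.List.enumerate_cons]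
      simp
    · intro j hj
      rw [PySem.Dict.contains_insert] at hj
      rcases Bool.or_eq_true_iff.mp hj with h1 | h2
      · have : j = i := by simpa using h1
        omega
      · have := h j h2
        omega

-- ===== VERDICT (by name: the statement is the Claim_ definition above) =====
theorem calculate_common_blocks_scheme_spec : Claim_equal_calculate_common_blocks_scheme := by
  intro edges blocks _
  unfold Spec_calculate_common_blocks_scheme
  unfold calculate_common_blocks_scheme calculate_common_blocks_scheme_alt
  set d := PySem.Dict.ofList blocks with hd
  have hk : d.keys.Nodup := PySem.Dict.nodup_keys_ofList blocks
  rw [pv_outer (fun edge => pv_weigh_common_blocks edge d) edges PySem.Dict.empty 0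
      (by intro j hj; simp [PySem.Dict.contains_empty] at hj)]
  have hemp : (PySem.Dict.empty : PySem.Dict Int Int).items = [] := rfl
  rw [hemp, List.nil_append]
  apply List.map_congr_left
  intro p _
  rcases p with ⟨i, u, v⟩
  simp only
  rw [pv_member_eq_blocksOf d hk u, pv_member_eq_blocksOf d hk v]
  rw [pv_inter_eq d hk u v]
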